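-- pv_equiv track=rewrite | github.com/Akun-python/Aireviewer | app/workflows/pipeline.py | _sentence_indices_for_quotes
-- ===== SOURCE A (Python) =====
-- def _sentence_indices_for_quotes(sentences: list[str], quotes: list[str]) -> list[int]:
--     indices: list[int] = []
--     for quote in quotes:
--         for idx, sentence in enumerate(sentences, start=1):
--             if quote and quote in sentence:
--                 indices.append(idx)
--                 break
--     return indices
-- ===== SOURCE B (Python) =====
-- def _sentence_indices_for_quotes(sentences: list[str], quotes: list[str]) -> list[int]:
--     # Single pass over the sentences: keep pending quote positions and fill a
--     # results table, instead of rescanning the sentence list once per quote.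
--     results: list = [None] * len(quotes)
--     pending = [pos for pos, quote in enumerate(quotes) if quote]
--     for idx, sentence in enumerate(sentences, start=1):
--         if not pending:
--             break
--         still = []
--         for pos in pending:
--             if quotes[pos] in sentence:
--                 results[pos] = idx
--             else:
--                 still.append(pos)
--         pending = still
--     return [r for r in results if r is not None]
-- ===== Notes on version B (the rewrite author's own statement) =====
-- stated objective: alternative
-- what changed: Instead of rescanning the sentence list from the start for every quote, B makes a single pass over the sentences maintaining a pending worklist of unmatched quote positions and a results table indexed by quote position, breaking out early once every non-empty quote has matched.
import Mathlib
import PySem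

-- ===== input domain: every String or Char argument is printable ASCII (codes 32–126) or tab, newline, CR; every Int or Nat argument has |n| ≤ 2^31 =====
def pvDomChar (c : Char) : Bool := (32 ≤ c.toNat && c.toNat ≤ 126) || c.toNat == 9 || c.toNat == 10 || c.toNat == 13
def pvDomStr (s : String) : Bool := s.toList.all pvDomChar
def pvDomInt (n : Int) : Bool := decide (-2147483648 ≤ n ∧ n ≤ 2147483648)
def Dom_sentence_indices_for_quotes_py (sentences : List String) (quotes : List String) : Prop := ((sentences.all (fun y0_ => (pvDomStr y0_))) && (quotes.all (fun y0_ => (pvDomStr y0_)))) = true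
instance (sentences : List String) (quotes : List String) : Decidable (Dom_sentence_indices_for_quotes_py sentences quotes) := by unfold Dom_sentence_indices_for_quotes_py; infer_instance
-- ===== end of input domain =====

-- B makes one pass over the sentences with a pending-positions worklist instead of
-- rescanning the sentence list once per quote (objective: alternative; same worst-case cost).

-- ===== PORT A =====
-- enumerate(sentences, start=1)
def pvEnum1 : Int → List String → List (Int × String)
  | _, [] => []
  | i, s :: rest => (i, s) :: pvEnum1 (i + 1) rest

-- A's inner 'for idx, sentence …: if quote and quote in sentence: indices.append(idx); break'
def pvAScan (quote : String) (indices : List Int) : List (Int × String) → List Int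
  | [] => indices
  | (idx, s) :: rest =>
    if (!(quote == "") && PySem.Str.isIn quote s) then indices ++ [idx]
    else pvAScan quote indices rest

def sentence_indices_for_quotes_py (sentences : List String) (quotes : List String) : List Int :=
  quotes.foldl (fun indices quote => pvAScan quote indices (pvEnum1 1 sentences)) []

-- ===== PORT B =====
-- B's inner loop over pending positions: state (results, still); quotes[pos] is always
-- in range (pending holds positions of quotes), so getD's default is never used.
def pvBInner (quotes : List String) (idx : Int) (sentence : String) :
    List Nat → List (Option Int) → List Nat → List (Option Int) × List Nat
  | [], results, still => (results, still)
  | pos :: rest, results, still =>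
    if PySem.Str.isIn (quotes.getD pos "") sentence then
      pvBInner quotes idx sentence rest (results.set pos (some idx)) still
    else
      pvBInner quotes idx sentence rest results (still ++ [pos])

-- B's outer loop over enumerate(sentences, start=1) with the early break on empty pending
def pvBLoop (quotes : List String) :
    List (Int × String) → List (Option Int) → List Nat → List (Option Int)
  | [], results, _ => results
  | (idx, s) :: rest, results, pending =>
    if pending.isEmpty then results
    else
      let rs := pvBInner quotes idx s pending results []
      pvBLoop quotes rest rs.1 rs.2

def sentence_indices_for_quotes_py_alt (sentences : List String) (quotes : List String) : List Int :=
  (pvBLoop quotes (pvEnum1 1 sentences) (List.replicate quotes.length none)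
    ((List.range quotes.length).filter (fun p => !(quotes.getD p "" == "")))).filterMap id

-- ===== PRECONDITION & SPEC =====
def Spec_sentence_indices_for_quotes_py (sentences : List String) (quotes : List String) (out : List Int) : Prop := out = sentence_indices_for_quotes_py_alt sentences quotes
instance (sentences : List String) (quotes : List String) (out : List Int) : Decidable (Spec_sentence_indices_for_quotes_py sentences quotes out) := by unfold Spec_sentence_indices_for_quotes_py; infer_instance

-- ===== CLAIM (what is proved, stated in full; the proofs are below) =====
def Claim_equal_sentence_indices_for_quotes_py : Prop := ∀ (sentences : List String) (quotes : List String), Dom_sentence_indices_for_quotes_py sentences quotes → Spec_sentence_indices_for_quotes_py sentences quotes (sentence_indices_for_quotes_py sentences quotes)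

-- ===== LEMMAS AND PROOFS =====

-- first 1-based index in the enumerated list whose sentence contains q (no emptiness test)
def pvFind (q : String) : List (Int × String) → Option Int
  | [] => none
  | (i, s) :: rest => if PySem.Str.isIn q s then some i else pvFind q rest

-- the common specification: per quote, its first matching index (none for empty quotes)
def pvG (E : List (Int × String)) (q : String) : Option Int :=
  if q = "" then none else pvFind q E

theorem pvAScan_empty (ind : List Int) (E : List (Int × String)) :
    pvAScan "" ind E = ind := by
  induction E with
  | nil => rfl
  | cons hd tl ih => obtain ⟨i, s⟩ := hd; simpa [pvAScan] using ih

theorem pvAScan_find (q : String) (hq : q ≠ "") (ind : List Int) (E : List (Int × String)) :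
    pvAScan q ind E = ind ++ (pvFind q E).toList := by
  induction E generalizing ind with
  | nil => simp [pvAScan, pvFind]
  | cons hd tl ih =>
    obtain ⟨i, s⟩ := hd
    simp only [pvAScan, pvFind]
    by_cases hin : PySem.Str.isIn q s = true
    · rw [if_pos (by rw [hin]; simp [hq]), if_pos hin]
      simp
    · have hin' : PySem.Str.isIn q s = false := Bool.eq_false_iff.mpr hin
      rw [if_neg (by rw [hin']; simp), if_neg hin, ih]

theorem pvAScan_eq (q : String) (ind : List Int) (E : List (Int × String)) :
    pvAScan q ind E = ind ++ (pvG E q).toList := by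
  by_cases hq : q = ""
  · subst hq; simp [pvAScan_empty, pvG]
  · rw [pvAScan_find q hq, pvG, if_neg hq]

theorem pvA_eq (ss qs : List String) (acc : List Int) :
    qs.foldl (fun indices quote => pvAScan quote indices (pvEnum1 1 ss)) acc
      = acc ++ qs.filterMap (pvG (pvEnum1 1 ss)) := by
  induction qs generalizing acc with
  | nil => simp
  | cons q rest ih =>
    rw [List.foldl_cons, pvAScan_eq, ih, List.filterMap_cons]
    cases h : pvG (pvEnum1 1 ss) q <;>
      simp only [Option.toList_none, Option.toList_some, List.append_nil,
        List.append_assoc, List.singleton_append]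

theorem pvBInner_spec (quotes : List String) (idx : Int) (s : String)
    (pending : List Nat) (results : List (Option Int)) (still : List Nat)
    (hb : ∀ p ∈ pending, p < results.length) :
    (pvBInner quotes idx s pending results still).1.length = results.length ∧
    (∀ k, (pvBInner quotes idx s pending results still).1[k]? =
      if k ∈ pending ∧ PySem.Str.isIn (quotes.getD k "") s = true then some (some idx)
      else results[k]?) ∧
    (pvBInner quotes idx s pending results still).2 =
      still ++ pending.filter (fun p => !(PySem.Str.isIn (quotes.getD p "") s)) := by
  induction pending generalizing results still with
  | nil =>
    refine ⟨rfl, fun k => ?_, by simp [pvBInner]⟩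
    simp only [List.not_mem_nil, false_and, if_false]
    rfl
  | cons pos rest ih =>
    have hpos : pos < results.length := hb pos (List.mem_cons_self)
    by_cases hin : PySem.Str.isIn (quotes.getD pos "") s = true
    · have hstep : pvBInner quotes idx s (pos :: rest) results still
          = pvBInner quotes idx s rest (results.set pos (some idx)) still := by
        simp only [pvBInner]; rw [if_pos hin]
      have hb' : ∀ p ∈ rest, p < (results.set pos (some idx)).length := by
        intro p hp; rw [List.length_set]; exact hb p (List.mem_cons_of_mem _ hp)
      obtain ⟨h1, h2, h3⟩ := ih (results.set pos (some idx)) still hb'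
      rw [hstep]
      refine ⟨by rw [h1, List.length_set], fun k => ?_, ?_⟩
      · rw [h2 k]
        by_cases hk : k ∈ rest ∧ PySem.Str.isIn (quotes.getD k "") s = true
        · rw [if_pos hk, if_pos ⟨List.mem_cons_of_mem _ hk.1, hk.2⟩]
        · rw [if_neg hk]
          by_cases hkp : k = pos
          · subst hkp
            rw [if_pos ⟨List.mem_cons_self, hin⟩]
            simp [hpos]
          · rw [List.getElem?_set_ne (fun h => hkp h.symm), if_neg (fun hc => by
              rcases List.mem_cons.mp hc.1 with h | h
              · exact hkp h
              · exact hk ⟨h, hc.2⟩)]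
      · rw [h3, List.filter_cons,
          if_neg (by simp only [hin, Bool.not_true]; exact Bool.false_ne_true)]
    · have hin' : PySem.Str.isIn (quotes.getD pos "") s = false := Bool.eq_false_iff.mpr hin
      have hstep : pvBInner quotes idx s (pos :: rest) results still
          = pvBInner quotes idx s rest results (still ++ [pos]) := by
        simp only [pvBInner]; rw [if_neg hin]
      have hb' : ∀ p ∈ rest, p < results.length :=
        fun p hp => hb p (List.mem_cons_of_mem _ hp)
      obtain ⟨h1, h2, h3⟩ := ih results (still ++ [pos]) hb'
      rw [hstep]
      refine ⟨h1, fun k => ?_, ?_⟩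
      · rw [h2 k]
        by_cases hk : k ∈ rest ∧ PySem.Str.isIn (quotes.getD k "") s = true
        · rw [if_pos hk, if_pos ⟨List.mem_cons_of_mem _ hk.1, hk.2⟩]
        · rw [if_neg hk, if_neg (fun hc => by
            rcases List.mem_cons.mp hc.1 with h | h
            · subst h; exact hin hc.2
            · exact hk ⟨h, hc.2⟩)]
      · rw [h3, List.filter_cons, if_pos (by simp only [hin', Bool.not_false]),
          List.append_assoc, List.singleton_append]

theorem pvBLoop_spec (quotes : List String) (E : List (Int × String))
    (results : List (Option Int)) (pending : List Nat)
    (hb : ∀ p ∈ pending, p < results.length) :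
    (pvBLoop quotes E results pending).length = results.length ∧
    ∀ k, (pvBLoop quotes E results pending)[k]? =
      if k ∈ pending then
        match pvFind (quotes.getD k "") E with
        | some i => some (some i)
        | none => results[k]?
      else results[k]? := by
  induction E generalizing results pending with
  | nil =>
    refine ⟨rfl, fun k => ?_⟩
    simp only [pvBLoop, pvFind]
    split <;> rfl
  | cons hd rest ih =>
    obtain ⟨idx, s⟩ := hd
    by_cases hp : pending.isEmpty
    · have hnil : pending = [] := List.isEmpty_iff.mp hp
      subst hnil
      have hstep : pvBLoop quotes ((idx, s) :: rest) results [] = results := by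
        simp [pvBLoop]
      rw [hstep]
      exact ⟨rfl, fun k => by simp⟩
    · have hstep : pvBLoop quotes ((idx, s) :: rest) results pending
          = pvBLoop quotes rest (pvBInner quotes idx s pending results []).1
              (pvBInner quotes idx s pending results []).2 := by
        simp only [pvBLoop]; rw [if_neg hp]
      obtain ⟨h1, h2, h3⟩ := pvBInner_spec quotes idx s pending results [] hb
      have hsub : ∀ p ∈ (pvBInner quotes idx s pending results []).2,
          p < (pvBInner quotes idx s pending results []).1.length := by
        intro p hm
        rw [h3, List.nil_append] at hm
        rw [h1]
        exact hb p (List.mem_filter.mp hm).1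
      obtain ⟨g1, g2⟩ := ih (pvBInner quotes idx s pending results []).1
        (pvBInner quotes idx s pending results []).2 hsub
      rw [hstep]
      refine ⟨by rw [g1, h1], fun k => ?_⟩
      rw [g2 k, h3, List.nil_append]
      by_cases hk : k ∈ pending
      · by_cases hin : PySem.Str.isIn (quotes.getD k "") s = true
        · have hnm : k ∉ pending.filter (fun p => !(PySem.Str.isIn (quotes.getD p "") s)) := by
            intro hm
            simp only [List.mem_filter, hin, Bool.not_true] at hm
            exact Bool.false_ne_true hm.2
          rw [if_neg hnm, h2 k, if_pos ⟨hk, hin⟩, if_pos hk]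
          have : pvFind (quotes.getD k "") ((idx, s) :: rest) = some idx := by
            simp only [pvFind]; rw [if_pos hin]
          rw [this]
        · have hin' : PySem.Str.isIn (quotes.getD k "") s = false := Bool.eq_false_iff.mpr hin
          have hm : k ∈ pending.filter (fun p => !(PySem.Str.isIn (quotes.getD p "") s)) :=
            List.mem_filter.mpr ⟨hk, by simp only [hin', Bool.not_false]⟩
          rw [if_pos hm, if_pos hk]
          have hfind : pvFind (quotes.getD k "") ((idx, s) :: rest)
              = pvFind (quotes.getD k "") rest := by
            simp only [pvFind]; rw [if_neg hin]
          rw [hfind, h2 k, if_neg (fun hc => hin hc.2)]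
      · have hnm : k ∉ pending.filter (fun p => !(PySem.Str.isIn (quotes.getD p "") s)) := by
          intro hm; exact hk (List.mem_filter.mp hm).1
        rw [if_neg hnm, if_neg hk, h2 k, if_neg (fun hc => hk hc.1)]

theorem pvB_eq_map (ss qs : List String) :
    pvBLoop qs (pvEnum1 1 ss) (List.replicate qs.length none)
        ((List.range qs.length).filter (fun p => !(qs.getD p "" == "")))
      = qs.map (pvG (pvEnum1 1 ss)) := by
  have hb : ∀ p ∈ (List.range qs.length).filter (fun p => !(qs.getD p "" == "")),
      p < (List.replicate qs.length (none : Option Int)).length := by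
    intro p hp
    rw [List.length_replicate]
    exact List.mem_range.mp (List.mem_filter.mp hp).1
  obtain ⟨h1, h2⟩ := pvBLoop_spec qs (pvEnum1 1 ss) (List.replicate qs.length none)
    ((List.range qs.length).filter (fun p => !(qs.getD p "" == ""))) hb
  apply List.ext_getElem?
  intro k
  rw [h2 k]
  by_cases hk : k < qs.length
  · have hget : qs.getD k "" = qs[k] := by
      rw [List.getD_eq_getElem?_getD, List.getElem?_eq_getElem hk]; rfl
    have hmap : (qs.map (pvG (pvEnum1 1 ss)))[k]? = some (pvG (pvEnum1 1 ss) qs[k]) := by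
      rw [List.getElem?_map, List.getElem?_eq_getElem hk]; rfl
    have hrep : (List.replicate qs.length (none : Option Int))[k]? = some none := by
      rw [List.getElem?_replicate, if_pos hk]
    by_cases hq : qs[k] = ""
    · have hempty : qs.getD k "" = "" := hget.trans hq
      have hnm : k ∉ (List.range qs.length).filter (fun p => !(qs.getD p "" == "")) := by
        intro hm
        simp only [List.mem_filter, hempty] at hm
        simp at hm
      rw [if_neg hnm, hrep, hmap, pvG, if_pos hq]
    · have hmem : k ∈ (List.range qs.length).filter (fun p => !(qs.getD p "" == "")) :=
        List.mem_filter.mpr ⟨List.mem_range.mpr hk, by rw [hget]; simpa using hq⟩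
      rw [if_pos hmem, hget, hmap, pvG, if_neg hq]
      cases hf : pvFind qs[k] (pvEnum1 1 ss) with
      | some i => rfl
      | none => rw [hrep]
  · have hnm : k ∉ (List.range qs.length).filter (fun p => !(qs.getD p "" == "")) := by
      intro hm; exact hk (List.mem_range.mp (List.mem_filter.mp hm).1)
    rw [if_neg hnm, List.getElem?_eq_none (by rw [List.length_replicate]; omega),
      List.getElem?_eq_none (by rw [List.length_map]; omega)]

-- ===== VERDICT (by name: the statement is the Claim_ definition above) =====
theorem sentence_indices_for_quotes_py_spec : Claim_equal_sentence_indices_for_quotes_py := by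
  intro ss qs _
  unfold Spec_sentence_indices_for_quotes_py sentence_indices_for_quotes_py
    sentence_indices_for_quotes_py_alt
  rw [pvA_eq, pvB_eq_map, List.filterMap_map, List.nil_append, Function.id_comp]
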